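-- pv_equiv track=rewrite | github.com/GC549739653/comp | sudokufinl.py | get_freq_nums
-- ===== SOURCE A (Python) =====
-- def get_freq_nums(data):
--     dic = {}
--     for i in range(1, 10): dic[i] = data.count(i)
--     freq_l = []
--     times = list(dic.values())
--     times.sort()
--     for i in times:  # find the most frequent digit
--         for j in range(1, 10):
--             if i == dic[j] and j not in freq_l:
--                 freq_l.append(j)
--     freq_l.reverse()
--     return freq_l
-- ===== SOURCE B (Python) =====
-- def get_freq_nums(data):
--     return sorted(range(1, 10), key=lambda d: (data.count(d), d), reverse=True)
-- ===== Notes on version B (the rewrite author's own statement) =====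
-- stated objective: simpler
-- what changed: Replaces A's dict-of-counts plus sort-the-count-values-then-nested-loop reconstruction (with a membership scan) by a single key-based sort of the digits 1-9 on the composite key (count, digit) with reverse=True, which directly yields frequency-descending order with higher-digit-first tie-breaking.
import Mathlib
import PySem

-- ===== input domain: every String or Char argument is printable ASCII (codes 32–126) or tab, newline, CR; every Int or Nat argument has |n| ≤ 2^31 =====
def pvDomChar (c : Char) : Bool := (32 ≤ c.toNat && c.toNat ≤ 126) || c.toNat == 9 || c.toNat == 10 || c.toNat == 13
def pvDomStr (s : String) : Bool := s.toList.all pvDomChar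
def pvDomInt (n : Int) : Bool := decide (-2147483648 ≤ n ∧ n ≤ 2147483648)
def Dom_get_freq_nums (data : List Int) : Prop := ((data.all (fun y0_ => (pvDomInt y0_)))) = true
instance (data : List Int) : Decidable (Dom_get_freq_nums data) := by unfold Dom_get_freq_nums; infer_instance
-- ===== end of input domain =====

-- B replaces A's dict + sort-the-counts + nested reconstruction by one key-based sort of the
-- digits 1-9 on (count, digit) with reverse=True (objective: simpler).


-- ===== PORT A =====
-- Python's dic[j] is exact as getD here: every key 1..9 is inserted before any lookup.
def get_freq_nums (data : List Int) : List Int :=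
  let dic : PySem.Dict Int Int :=
    (PySem.List.pyRange 1 10).foldl
      (fun d i => d.insert i ((PySem.List.count data i : Nat) : Int)) PySem.Dict.empty
  let times : List Int := PySem.List.sorted (PySem.Dict.values dic) (fun x => x) false
  let freq_l : List Int :=
    times.foldl (fun acc i =>
      (PySem.List.pyRange 1 10).foldl (fun acc2 j =>
        if i = PySem.Dict.getD dic j 0 ∧ ¬ (j ∈ acc2) then acc2 ++ [j] else acc2) acc) []
  freq_l.reverse

-- ===== PORT B =====
def get_freq_nums_alt (data : List Int) : List Int :=
  PySem.List.sorted2 (PySem.List.pyRange 1 10)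
    (fun d => ((PySem.List.count data d : Nat) : Int)) (fun d => d) true

-- ===== PRECONDITION & SPEC =====
def Spec_get_freq_nums (data : List Int) (out : List Int) : Prop := out = get_freq_nums_alt data
instance (data : List Int) (out : List Int) : Decidable (Spec_get_freq_nums data out) := by unfold Spec_get_freq_nums; infer_instance

-- ===== CLAIM (what is proved, stated in full; the proofs are below) =====
def Claim_equal_get_freq_nums : Prop := ∀ (data : List Int), Dom_get_freq_nums data → Spec_get_freq_nums data (get_freq_nums data)

-- ===== LEMMAS AND PROOFS =====

-- the digit count, as A's dict stores it and B's key uses it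
def cntF (data : List Int) (j : Int) : Int := ((PySem.List.count data j : Nat) : Int)

def digitsL : List Int := PySem.List.pyRange 1 10

lemma digitsL_eq : digitsL = [1, 2, 3, 4, 5, 6, 7, 8, 9] := by decide

lemma digit_bounds : ∀ j ∈ digitsL, 1 ≤ j ∧ j ≤ 9 := by rw [digitsL_eq]; decide

-- A's dict after the first loop, explicitly
def dicD (data : List Int) : PySem.Dict Int Int :=
  PySem.Dict.mk [(1, cntF data 1), (2, cntF data 2), (3, cntF data 3), (4, cntF data 4),
    (5, cntF data 5), (6, cntF data 6), (7, cntF data 7), (8, cntF data 8), (9, cntF data 9)]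

set_option maxHeartbeats 2000000 in
lemma dic_eq (data : List Int) :
    (PySem.List.pyRange 1 10).foldl
      (fun d i => d.insert i ((PySem.List.count data i : Nat) : Int)) PySem.Dict.empty
      = dicD data := rfl

lemma getD_dic (data : List Int) (j : Int) (hj : j ∈ digitsL) :
    PySem.Dict.getD (dicD data) j 0 = cntF data j := by
  rw [digitsL_eq] at hj
  simp only [List.mem_cons, List.not_mem_nil, or_false] at hj
  rcases hj with rfl | rfl | rfl | rfl | rfl | rfl | rfl | rfl | rfl <;> rfl

lemma values_dic (data : List Int) :
    PySem.Dict.values (dicD data) = digitsL.map (cntF data) := by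
  rw [digitsL_eq]; rfl

-- one inner pass of A's reconstruction loop appends exactly the new digits of count i, in order
lemma inner_eq (c : Int → Int) (i : Int) :
    ∀ (l : List Int), l.Nodup → ∀ acc : List Int,
      l.foldl (fun acc2 j => if i = c j ∧ ¬ (j ∈ acc2) then acc2 ++ [j] else acc2) acc
        = acc ++ l.filter (fun j => decide (i = c j) && !(decide (j ∈ acc))) := by
  intro l
  induction l with
  | nil => intro _ acc; simp
  | cons x t ih =>
    intro hnd acc
    rcases List.nodup_cons.mp hnd with ⟨hx, hnd'⟩
    by_cases hc : i = c x ∧ ¬ (x ∈ acc)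
    · simp only [List.foldl_cons, if_pos hc]
      rw [ih hnd' (acc ++ [x])]
      have hfc : ∀ j ∈ t, (decide (i = c j) && !(decide (j ∈ acc ++ [x])))
          = (decide (i = c j) && !(decide (j ∈ acc))) := by
        intro j hjt
        have hne : j ≠ x := fun h => hx (h ▸ hjt)
        simp [List.mem_append, hne]
      rw [List.filter_congr hfc]
      have hT : (decide (i = c x) && !(decide (x ∈ acc))) = true := by
        simp [hc.1, hc.2]
      simp [hT]
    · simp only [List.foldl_cons, if_neg hc]
      rw [ih hnd' acc]
      have hF : (decide (i = c x) && !(decide (x ∈ acc))) = false := by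
        by_cases h1 : i = c x
        · have : x ∈ acc := by by_contra h2; exact hc ⟨h1, h2⟩
          simp [this]
        · simp [h1]
      simp [hF]

-- invariant of A's outer loop over the ascending count values
lemma outer_loop (c : Int → Int) :
    ∀ (ts : List Int), ts.Pairwise (· ≤ ·) →
    ∀ (acc seen : List Int),
      (∀ j, j ∈ acc ↔ j ∈ digitsL ∧ c j ∈ seen) →
      acc.Pairwise (fun a b => 10 * c a + a < 10 * c b + b) →
      (∀ v ∈ seen, ∀ i ∈ ts, v ≤ i) →
      (∀ j, j ∈ ts.foldl (fun acc i =>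
            acc ++ digitsL.filter (fun j => decide (i = c j) && !(decide (j ∈ acc)))) acc
          ↔ j ∈ digitsL ∧ (c j ∈ seen ∨ c j ∈ ts)) ∧
      (ts.foldl (fun acc i =>
            acc ++ digitsL.filter (fun j => decide (i = c j) && !(decide (j ∈ acc)))) acc).Pairwise
        (fun a b => 10 * c a + a < 10 * c b + b) := by
  intro ts
  induction ts with
  | nil =>
    intro _ acc seen hmem hpw _
    constructor
    · intro j; simpa using hmem j
    · simpa using hpw
  | cons i rest ih =>
    intro hpwts acc seen hmem hpw hseen
    rcases List.pairwise_cons.mp hpwts with ⟨hi, hrest⟩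
    set acc' := acc ++ digitsL.filter (fun j => decide (i = c j) && !(decide (j ∈ acc))) with hacc'
    have hstep : ∀ j, j ∈ acc' ↔ j ∈ acc ∨ (j ∈ digitsL ∧ i = c j ∧ ¬ j ∈ acc) := by
      intro j
      simp [hacc', List.mem_append, List.mem_filter]
    have hmem' : ∀ j, j ∈ acc' ↔ j ∈ digitsL ∧ c j ∈ (seen ++ [i]) := by
      intro j
      rw [hstep j]
      simp only [List.mem_append, List.mem_singleton]
      constructor
      · rintro (hja | ⟨hj, heq, _⟩)
        · rcases (hmem j).mp hja with ⟨hj, hs⟩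
          exact ⟨hj, Or.inl hs⟩
        · exact ⟨hj, Or.inr heq.symm⟩
      · rintro ⟨hj, hs | heq⟩
        · exact Or.inl ((hmem j).mpr ⟨hj, hs⟩)
        · by_cases ha : j ∈ acc
          · exact Or.inl ha
          · exact Or.inr ⟨hj, heq.symm, ha⟩
    have hpw' : acc'.Pairwise (fun a b => 10 * c a + a < 10 * c b + b) := by
      rw [hacc', List.pairwise_append]
      refine ⟨hpw, ?_, ?_⟩
      · have hd : (digitsL.filter (fun j => decide (i = c j) && !(decide (j ∈ acc)))).Pairwise (· < ·) := by
          apply List.Pairwise.filter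
          rw [digitsL_eq]; decide
        refine hd.imp_of_mem ?_
        intro a b ha hb hab
        have hca : i = c a := by
          have := (List.mem_filter.mp ha).2; simp at this; exact this.1
        have hcb : i = c b := by
          have := (List.mem_filter.mp hb).2; simp at this; exact this.1
        omega
      · intro a ha b hb
        have h1 := (hmem a).mp ha
        have hb' := List.mem_filter.mp hb
        have hb2 := hb'.2
        simp only [Bool.and_eq_true, decide_eq_true_eq, Bool.not_eq_true',
          decide_eq_false_iff_not] at hb2
        have hcb : c b = i := hb2.1.symm
        have hbnacc : ¬ b ∈ acc := hb2.2
        have hcbns : ¬ c b ∈ seen := by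
          intro h; exact hbnacc ((hmem b).mpr ⟨hb'.1, h⟩)
        have hca_le : c a ≤ i := hseen _ h1.2 i (List.mem_cons_self ..)
        have hca_ne : c a ≠ c b := fun h => hcbns (h ▸ h1.2)
        have hba := digit_bounds a h1.1
        have hbb := digit_bounds b hb'.1
        omega
    have hseen' : ∀ v ∈ seen ++ [i], ∀ x ∈ rest, v ≤ x := by
      intro v hv x hx
      rcases List.mem_append.mp hv with hv | hv
      · exact hseen v hv x (List.mem_cons_of_mem _ hx)
      · simp only [List.mem_singleton] at hv; exact hv ▸ hi x hx
    have hih := ih hrest acc' (seen ++ [i]) hmem' hpw' hseen'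
    refine ⟨?_, ?_⟩
    · intro j
      rw [List.foldl_cons, hih.1 j]
      simp only [List.mem_append, List.mem_cons]
      tauto
    · rw [List.foldl_cons]; exact hih.2

-- insertBy only consults the comparator between the new element and the accumulator
lemma insertBy_congr {α : Type} (f g : α → α → Bool) (x : α) :
    ∀ acc : List α, (∀ b ∈ acc, f x b = g x b) →
      PySem.List.insertBy f x acc = PySem.List.insertBy g x acc := by
  intro acc
  induction acc with
  | nil => intro _; rfl
  | cons y ys ih =>
    intro h
    simp only [PySem.List.insertBy]
    rw [h y (List.mem_cons_self ..)]
    by_cases hg : g x y = true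
    · simp [hg]
    · simp only [hg]
      have hih := ih (fun b hb => h b (List.mem_cons_of_mem _ hb))
      rw [hih]

lemma foldl_insertBy_congr {α : Type} (f g : α → α → Bool) (S : List α)
    (h : ∀ a ∈ S, ∀ b ∈ S, f a b = g a b) :
    ∀ (l : List α), (∀ x ∈ l, x ∈ S) → ∀ acc : List α, (∀ b ∈ acc, b ∈ S) →
      l.foldl (fun acc x => PySem.List.insertBy f x acc) acc
        = l.foldl (fun acc x => PySem.List.insertBy g x acc) acc := by
  intro l
  induction l with
  | nil => intro _ acc _; rfl
  | cons x t ih =>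
    intro hl acc hacc
    have hxS : x ∈ S := hl x (List.mem_cons_self ..)
    simp only [List.foldl_cons]
    rw [insertBy_congr f g x acc (fun b hb => h x hxS b (hacc b hb))]
    exact ih (fun y hy => hl y (List.mem_cons_of_mem _ hy))
      (PySem.List.insertBy g x acc)
      (fun b hb => by
        rcases (PySem.List.mem_insertBy g x b acc).mp hb with rfl | hb
        · exact hxS
        · exact hacc b hb)

-- B's tuple-key reverse sort is the reverse sort by the single key 10*count+digit
lemma sorted2_eq_sorted_K (data : List Int) :
    get_freq_nums_alt data
      = PySem.List.sorted digitsL (fun j => 10 * cntF data j + j) true := by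
  have h1 : get_freq_nums_alt data
      = digitsL.foldl (fun acc x => PySem.List.insertBy
          (fun a b => decide (cntF data b < cntF data a) ||
            (!decide (cntF data a < cntF data b) && decide (b < a))) x acc) [] := rfl
  rw [h1, PySem.List.sorted_rev_eq_foldl_insertBy]
  apply foldl_insertBy_congr _ _ digitsL ?_ digitsL (fun x hx => hx) [] (by simp)
  intro a ha b hb
  rcases digit_bounds a ha with ⟨ha1, ha2⟩
  rcases digit_bounds b hb with ⟨hb1, hb2⟩
  rw [Bool.eq_iff_iff]
  simp only [Bool.or_eq_true, Bool.and_eq_true, Bool.not_eq_true', decide_eq_true_eq,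
    decide_eq_false_iff_not]
  omega

theorem pv_main (data : List Int) : get_freq_nums data = get_freq_nums_alt data := by
  have hdig : PySem.List.pyRange 1 10 = digitsL := rfl
  have hfun : (fun (acc : List Int) (i : Int) => digitsL.foldl (fun acc2 j =>
        if i = PySem.Dict.getD (dicD data) j 0 ∧ ¬ (j ∈ acc2) then acc2 ++ [j] else acc2) acc)
      = (fun acc i => acc ++ digitsL.filter
          (fun j => decide (i = cntF data j) && !(decide (j ∈ acc)))) := by
    funext acc i
    have h1 := PySem.List.foldl_congr_mem digitsL
      (fun acc2 j => if i = PySem.Dict.getD (dicD data) j 0 ∧ ¬ (j ∈ acc2) then acc2 ++ [j] else acc2)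
      (fun acc2 j => if i = cntF data j ∧ ¬ (j ∈ acc2) then acc2 ++ [j] else acc2)
      acc (fun acc2 j hj => by simp only [getD_dic data j hj])
    rw [h1]
    exact inner_eq (cntF data) i digitsL (by rw [digitsL_eq]; decide) acc
  simp only [get_freq_nums]
  rw [dic_eq data, hdig, values_dic, hfun]
  set c := cntF data with hc
  set times := PySem.List.sorted (digitsL.map c) (fun x => x) false with htimes
  set L := times.foldl (fun acc i =>
      acc ++ digitsL.filter (fun j => decide (i = c j) && !(decide (j ∈ acc)))) [] with hL
  have ht_pw : times.Pairwise (· ≤ ·) := PySem.List.sorted_pairwise (digitsL.map c) (fun x => x)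
  have hinv := outer_loop c times ht_pw [] [] (by simp) (by simp) (by simp)
  have hmemL : ∀ j, j ∈ L ↔ j ∈ digitsL := by
    intro j
    rw [hL, hinv.1 j]
    constructor
    · exact fun h => h.1
    · intro hj
      refine ⟨hj, Or.inr ?_⟩
      rw [htimes, (PySem.List.sorted_perm (digitsL.map c) (fun x => x) false).mem_iff]
      exact List.mem_map_of_mem hj
  have hpwL : L.Pairwise (fun a b => 10 * c a + a < 10 * c b + b) := hinv.2
  have hnodL : L.Nodup := hpwL.imp (fun {a b} h => fun e => by subst e; omega)
  have hperm : L.Perm digitsL :=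
    (List.perm_ext_iff_of_nodup hnodL (by rw [digitsL_eq]; decide)).mpr hmemL
  rw [sorted2_eq_sorted_K data]
  have hrev := PySem.List.sorted_rev_eq_of_perm_of_pairwise_gt digitsL L.reverse
    (fun j => 10 * c j + j) ((List.reverse_perm L).trans hperm)
    (by rw [List.pairwise_reverse]; exact hpwL)
  exact hrev.symm

-- ===== VERDICT (by name: the statement is the Claim_ definition above) =====
theorem get_freq_nums_spec : Claim_equal_get_freq_nums := by
  intro data _
  unfold Spec_get_freq_nums
  exact pv_main data
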